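-- pv_equiv track=rewrite | github.com/Nitish36/Practice-Problems | python/codesignal solutions/shapeArea.py | solution
-- ===== SOURCE A (Python) =====
-- def solution(n):
--     k=0
--     s=1
--     for i in range(n-1):
--         k+=2
--     for i in range(k):
--         s+=n
--     return(s)
-- ===== SOURCE B (Python) =====
-- def solution(n):
--     return 2 * n * n - 2 * n + 1
-- ===== Notes on version B (the rewrite author's own statement) =====
-- stated objective: faster
-- what changed: Replaces A's two counting loops (k += 2 over range(n-1), then s += n over range(k)) with the closed-form polynomial 2*n*n - 2*n + 1.
-- outside the precondition, e.g. on solution(-3): A returns 1, B returns 25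
import Mathlib
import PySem

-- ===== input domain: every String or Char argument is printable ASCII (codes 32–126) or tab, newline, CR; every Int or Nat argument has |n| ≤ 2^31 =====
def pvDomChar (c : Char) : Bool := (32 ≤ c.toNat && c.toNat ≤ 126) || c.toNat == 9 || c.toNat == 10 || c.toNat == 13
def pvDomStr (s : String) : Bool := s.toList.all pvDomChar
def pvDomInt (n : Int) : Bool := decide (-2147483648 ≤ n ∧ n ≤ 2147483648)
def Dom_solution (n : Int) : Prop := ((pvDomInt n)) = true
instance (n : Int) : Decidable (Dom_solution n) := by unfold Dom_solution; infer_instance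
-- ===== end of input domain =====

-- B replaces A's two counting loops with the closed-form polynomial 2n^2 - 2n + 1 (O(1) vs O(n)).

-- ===== PORT A =====
def solution (n : Int) : Int :=
  let k := (PySem.List.pyRange 0 (n - 1) 1).foldl (fun k _ => k + 2) 0
  (PySem.List.pyRange 0 k 1).foldl (fun s _ => s + n) 1

-- ===== PORT B =====
def solution_alt (n : Int) : Int := 2 * n * n - 2 * n + 1

-- ===== PRECONDITION & SPEC =====
-- Pre_ excludes negative n, which lie outside the puzzle's natural domain (a shape size):
-- there A's empty-range loops leave s = 1 while B's closed form extends the polynomial.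
def Pre_solution (n : Int) : Prop := 0 ≤ n
instance (n : Int) : Decidable (Pre_solution n) := by unfold Pre_solution; infer_instance
def pvWitness_solution : Int := (3)

def Spec_solution (n : Int) (out : Int) : Prop := out = solution_alt n
instance (n : Int) (out : Int) : Decidable (Spec_solution n out) := by unfold Spec_solution; infer_instance

-- ===== CLAIM (what is proved, stated in full; the proofs are below) =====
def Claim_equal_solution : Prop := ∀ (n : Int), Dom_solution n → Pre_solution n → Spec_solution n (solution n)

-- ===== LEMMAS AND PROOFS =====
theorem foldl_const_add (l : List Int) (c init : Int) :
    l.foldl (fun a _ => a + c) init = init + c * l.length := by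
  induction l generalizing init with
  | nil => simp
  | cons x xs ih => simp [List.foldl, ih]; ring

-- ===== VERDICT (by name: the statement is the Claim_ definition above) =====
theorem solution_spec : Claim_equal_solution := by
  intro n _ hn
  have hn0 : 0 ≤ n := hn
  unfold Spec_solution solution solution_alt
  simp only [foldl_const_add, PySem.List.length_pyRange_one]
  rcases lt_or_ge n 1 with h | h
  · have hz : n = 0 := by omega
    subst hz; decide
  · have h1 : ((n - 1 - 0).toNat : Int) = n - 1 := by omega
    rw [h1]
    have hk : ((0 + 2 * (n - 1) - 0).toNat : Int) = 2 * (n - 1) := by omega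
    rw [hk]
    ring
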